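-- pv_equiv track=rewrite | github.com/dryingpaint/capable-bench | capablebench/curate.py | _peptide_by_compound
-- ===== SOURCE A (Python) =====
-- def _peptide_by_compound(peptides: list[dict[str, str]]) -> dict[str, dict[str, str]]:
--     by_compound = {}
--     for row in peptides:
--         compound = row.get("compound", "")
--         if compound:
--             by_compound[compound.lower()] = row
--     mch_reference = sorted(
--         (
--             row
--             for row in peptides
--             if row.get("receptor_family") == "MCH" and row.get("assay_count", "0").isdigit()
--         ),
--         key=lambda row: int(row.get("assay_count", "0")),
--         reverse=True,
--     )
--     if mch_reference:
--         by_compound.setdefault("amch", mch_reference[0])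
--     return by_compound
-- ===== SOURCE B (Python) =====
-- def _peptide_by_compound(peptides: list[dict[str, str]]) -> dict[str, dict[str, str]]:
--     by_compound = {}
--     best = None
--     best_count = -1
--     for row in peptides:
--         compound = row.get("compound", "")
--         if compound:
--             by_compound[compound.lower()] = row
--         count = row.get("assay_count", "0")
--         if row.get("receptor_family") == "MCH" and count.isdigit():
--             c = int(count)
--             if c > best_count:
--                 best, best_count = row, c
--     if best is not None:
--         by_compound.setdefault("amch", best)
--     return by_compound
-- ===== Notes on version B (the rewrite author's own statement) =====
-- stated objective: alternative
-- what changed: Replaces A's build-dict pass plus separate filter/reverse-sort/take-head of MCH rows by a single fused pass that tracks the best MCH reference with a strict-increase comparison (preserving first-of-equal-maxima) and one final setdefault.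
import Mathlib
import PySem

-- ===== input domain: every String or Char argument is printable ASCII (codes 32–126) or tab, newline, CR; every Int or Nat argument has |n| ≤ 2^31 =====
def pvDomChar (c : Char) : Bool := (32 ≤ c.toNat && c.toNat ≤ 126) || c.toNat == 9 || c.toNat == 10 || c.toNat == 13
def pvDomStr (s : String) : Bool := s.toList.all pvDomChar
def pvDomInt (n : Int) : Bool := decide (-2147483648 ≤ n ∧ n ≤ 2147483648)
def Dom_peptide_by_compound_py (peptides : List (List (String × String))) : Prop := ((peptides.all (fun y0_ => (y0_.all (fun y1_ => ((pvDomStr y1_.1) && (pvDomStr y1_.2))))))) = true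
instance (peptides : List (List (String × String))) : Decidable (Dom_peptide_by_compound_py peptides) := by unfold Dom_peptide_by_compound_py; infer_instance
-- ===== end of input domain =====

-- B replaces A's build-dict / filter / reverse-sort / take-head shape by one interleaved pass that
-- tracks the best MCH row with a strict-increase comparison (objective: alternative decomposition,
-- one traversal instead of three; same asymptotic cost).

-- shared primitive: row.get(k, dflt) on a row dict (first match in the association list)
def pvRowGetD (row : List (String × String)) (k dflt : String) : String :=
  ((row.lookup k).getD dflt)

-- ===== PORT A =====
-- row.get("receptor_family") == "MCH" and row.get("assay_count", "0").isdigit()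
def pvMchPred (row : List (String × String)) : Bool :=
  row.lookup "receptor_family" == some "MCH" && PySem.Str.strIsdigit (pvRowGetD row "assay_count" "0")

-- key=lambda row: int(row.get("assay_count", "0"))  (the filter guarantees the parse succeeds;
-- .getD 0 only totalises the Option)
def pvMchKey (row : List (String × String)) : Int :=
  (PySem.Int.ofStr? (pvRowGetD row "assay_count" "0")).getD 0

def peptide_by_compound_py (peptides : List (List (String × String))) : List (String × List (String × String)) :=
  let by_compound := peptides.foldl
    (fun d row =>
      let compound := pvRowGetD row "compound" ""
      if compound ≠ "" then d.insert (PySem.Str.lower compound) row else d)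
    (PySem.Dict.empty)
  let mch_reference := PySem.List.sorted (peptides.filter pvMchPred) pvMchKey true
  (match mch_reference with
   | [] => by_compound
   | m :: _ => by_compound.setdefault "amch" m).items

-- ===== PORT B =====
-- one fused loop: state = (by_compound, best, best_count)
def pvStepB (s : PySem.Dict String (List (String × String)) × Option (List (String × String)) × Int)
    (row : List (String × String)) :
    PySem.Dict String (List (String × String)) × Option (List (String × String)) × Int :=
  let compound := pvRowGetD row "compound" ""
  let d := if compound ≠ "" then s.1.insert (PySem.Str.lower compound) row else s.1
  if pvMchPred row then
    let c := pvMchKey row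
    if c > s.2.2 then (d, some row, c) else (d, s.2.1, s.2.2)
  else (d, s.2.1, s.2.2)

def peptide_by_compound_py_alt (peptides : List (List (String × String))) : List (String × List (String × String)) :=
  let s := peptides.foldl pvStepB (PySem.Dict.empty, none, -1)
  (match s.2.1 with
   | none => s.1
   | some best => s.1.setdefault "amch" best).items

-- ===== PRECONDITION & SPEC =====
def Spec_peptide_by_compound_py (peptides : List (List (String × String))) (out : List (String × List (String × String))) : Prop := out = peptide_by_compound_py_alt peptides
instance (peptides : List (List (String × String))) (out : List (String × List (String × String))) : Decidable (Spec_peptide_by_compound_py peptides out) := by unfold Spec_peptide_by_compound_py; infer_instance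

-- ===== CLAIM (what is proved, stated in full; the proofs are below) =====
def Claim_equal_peptide_by_compound_py : Prop := ∀ (peptides : List (List (String × String))), Dom_peptide_by_compound_py peptides → Spec_peptide_by_compound_py peptides (peptide_by_compound_py peptides)

-- ===== LEMMAS AND PROOFS =====

-- the dict half of B's fused step, i.e. A's first loop
def pvStepDict (d : PySem.Dict String (List (String × String))) (row : List (String × String)) :
    PySem.Dict String (List (String × String)) :=
  let compound := pvRowGetD row "compound" ""
  if compound ≠ "" then d.insert (PySem.Str.lower compound) row else d

-- the best-tracking half of B's fused step, over the rows passing pvMchPred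
def pvStepBest (s : Option (List (String × String)) × Int) (row : List (String × String)) :
    Option (List (String × String)) × Int :=
  if pvMchKey row > s.2 then (some row, pvMchKey row) else s

-- a digit character is not int()-whitespace
theorem pv_digit_not_space (c : Char) (h : PySem.Chars.isdigit c = true) : PySem.Int.isIntSpace c = false := by
  simp [PySem.Chars.isdigit, Char.le_def] at h
  simp only [PySem.Int.isIntSpace, Bool.or_eq_false_iff, decide_eq_false_iff_not]
  refine ⟨⟨⟨⟨⟨?_,?_⟩,?_⟩,?_⟩,?_⟩,?_⟩ <;> rintro rfl <;> simp_all

theorem pv_bind_nonneg (X : Option Nat) :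
    0 ≤ (Option.map (fun n : Int => n) (Option.bind X (fun a => some ((a:Int))))).getD 0 := by
  cases X <;> simp

-- int(s) of a digits-only string is a nonnegative value (so it beats B's -1 sentinel)
theorem pv_ofChars_digits_nonneg (cs : List Char) (h : PySem.Chars.strIsdigit cs = true) :
    0 ≤ (PySem.Int.ofChars? cs).getD 0 := by
  simp [PySem.Chars.strIsdigit] at h
  obtain ⟨hne, hall⟩ := h
  have hds : List.dropWhile PySem.Int.isIntSpace cs = cs := by
    cases cs with
    | nil => rfl
    | cons c t =>
      rw [List.dropWhile_cons_of_neg]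
      simp [pv_digit_not_space c (hall c (by simp))]
  have hds2 : List.dropWhile PySem.Int.isIntSpace cs.reverse = cs.reverse := by
    cases hr : cs.reverse with
    | nil => rfl
    | cons c t =>
      rw [List.dropWhile_cons_of_neg]
      have : c ∈ cs := by rw [← List.mem_reverse, hr]; simp
      simp [pv_digit_not_space c (hall c this)]
  unfold PySem.Int.ofChars?
  rw [hds, hds2, List.reverse_reverse]
  cases cs with
  | nil => simp at hne
  | cons c t =>
    have hc := hall c (by simp)
    have h1 : c ≠ '-' := by rintro rfl; simp [PySem.Chars.isdigit, Char.le_def] at hc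
    have h2 : c ≠ '+' := by rintro rfl; simp [PySem.Chars.isdigit, Char.le_def] at hc
    dsimp only
    split
    all_goals first
      | exact pv_bind_nonneg _
      | (rename_i ds heq; injection heq with hh _; exact absurd hh (by assumption))

theorem pv_key_nonneg (row : List (String × String)) (h : pvMchPred row = true) : 0 ≤ pvMchKey row := by
  simp only [pvMchPred, Bool.and_eq_true, PySem.Str.strIsdigit_eq] at h
  unfold pvMchKey
  have := pv_ofChars_digits_nonneg _ h.2
  rwa [← PySem.Int.ofStr?_ofList, String.ofList_toList] at this

theorem pv_stepB_false (d : PySem.Dict String (List (String × String)))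
    (s : Option (List (String × String)) × Int) (row : List (String × String))
    (hp : pvMchPred row = false) : pvStepB (d, s) row = (pvStepDict d row, s) := by
  simp [pvStepB, pvStepDict, hp]

theorem pv_stepB_true (d : PySem.Dict String (List (String × String)))
    (s : Option (List (String × String)) × Int) (row : List (String × String))
    (hp : pvMchPred row = true) : pvStepB (d, s) row = (pvStepDict d row, pvStepBest s row) := by
  simp only [pvStepB, pvStepDict, pvStepBest, hp]
  by_cases hgt : pvMchKey row > s.2 <;> simp [hgt]

-- B's fused fold splits into A's dict fold and the best-tracking fold over the filtered rows
theorem pv_fuse (ps : List (List (String × String)))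
    (d : PySem.Dict String (List (String × String)))
    (s : Option (List (String × String)) × Int) :
    ps.foldl pvStepB (d, s) =
      (ps.foldl pvStepDict d, (ps.filter pvMchPred).foldl pvStepBest s) := by
  induction ps generalizing d s with
  | nil => rfl
  | cons r t ih =>
    cases hp : pvMchPred r with
    | false =>
      rw [List.foldl_cons, pv_stepB_false _ _ _ hp, ih, List.filter_cons, if_neg (by simp [hp])]
      simp only [List.foldl_cons]
    | true =>
      rw [List.foldl_cons, pv_stepB_true _ _ _ hp, ih, List.filter_cons, if_pos (by simp [hp])]
      simp only [List.foldl_cons]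

-- the best-tracking fold computes the head of the stable reverse sort (first row of maximal key)
theorem pv_best_eq_sorted_head (ys : List (List (String × String))) :
    (∀ y ∈ ys, 0 ≤ pvMchKey y) →
    ys.foldl pvStepBest (none, -1) =
      (match PySem.List.sorted ys pvMchKey true with
       | [] => (none, -1)
       | m :: _ => (some m, pvMchKey m)) := by
  rw [PySem.List.sorted_rev_eq_foldl_insertBy]
  induction ys using List.reverseRecOn with
  | nil => intro _; rfl
  | append_singleton t x ih =>
    intro hnn
    have hx : 0 ≤ pvMchKey x := hnn x (by simp)
    rw [List.foldl_append, List.foldl_append, List.foldl_cons, List.foldl_nil, List.foldl_cons,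
      List.foldl_nil, ih (fun y hy => hnn y (by simp [hy]))]
    cases hL : List.foldl
        (fun acc x => PySem.List.insertBy (fun a b => decide (pvMchKey b < pvMchKey a)) x acc) [] t with
    | nil =>
      have hgt : pvMchKey x > -1 := by omega
      simp [pvStepBest, PySem.List.insertBy, hgt]
    | cons m tl =>
      have hins : PySem.List.insertBy (fun a b => decide (pvMchKey b < pvMchKey a)) x (m :: tl)
          = if pvMchKey m < pvMchKey x then x :: m :: tl
            else m :: PySem.List.insertBy (fun a b => decide (pvMchKey b < pvMchKey a)) x tl := by
        simp [PySem.List.insertBy]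
      rw [hins]
      by_cases hlt : pvMchKey m < pvMchKey x
      · simp [pvStepBest, hlt, gt_iff_lt]
      · simp [pvStepBest, hlt, gt_iff_lt]

-- ===== VERDICT (by name: the statement is the Claim_ definition above) =====
theorem peptide_by_compound_py_spec : Claim_equal_peptide_by_compound_py := by
  intro peptides _
  unfold Spec_peptide_by_compound_py peptide_by_compound_py peptide_by_compound_py_alt
  rw [pv_fuse]
  rw [pv_best_eq_sorted_head _ (fun y hy => pv_key_nonneg y (List.of_mem_filter hy))]
  cases PySem.List.sorted (peptides.filter pvMchPred) pvMchKey true <;> rfl
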